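-- pv_equiv track=rewrite | github.com/gh640/SublimePhpArrayConverter | PhpArrayConverter.py | gen_converted_code
-- ===== SOURCE A (Python) =====
-- def gen_converted_code(tokens):
--     replacements = {}
--     for i, t1 in enumerate(tokens):
--         if PhpToken.equals('T_ARRAY', t1[0]):
--             is_array_opened = False
--             is_array_closed = False
--             i_next = i + 1
--             i_open = None
--             i_close = None
--
--             # Find the matching open brace.
--             for j, t2 in enumerate(tokens[i_next:]):
--                 if PhpToken.equals('T_WHITESPACE', t2[0]):
--                     continue
--
--                 if PhpToken.equals('BRACE_OPEN', t2[0]):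
--                     i_open = i_next + j
--                     is_array_opened = True
--
--                 # Break if any element other than space comes.
--                 break
--
--             # Find the matching close brace.
--             if is_array_opened:
--                 depth = 0
--                 for j, t2 in enumerate(tokens[i_next:]):
--                     if PhpToken.equals('BRACE_OPEN', t2[0]):
--                         depth += 1
--                     elif PhpToken.equals('BRACE_CLOSE', t2[0]):
--                         depth -= 1
--                         if depth == 0:
--                             i_close = i_next + j
--                             is_array_closed = True
--                             break
--
--             # Register replacements if a set of array, open brace and close
--             # brace are found.
--             if is_array_opened and is_array_closed:
--                 replacements[i] = ['[', '[', None]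
--                 for k in range(i_next, i_open + 1):
--                     replacements[k] = ['', '', None]
--                 replacements[i_close] = [']', ']', None]
--
--     tokens_converted = []
--     for i, t in enumerate(tokens):
--         try:
--             token = replacements[i]
--         except KeyError as e:
--             token = t
--         tokens_converted.append(token)
--
--     return ''.join(x[1] for x in tokens_converted)
--
-- class PhpToken:
--     """Checks php tokens.
--     """
--
--     TOKEN_MAP = {
--         'T_OPEN_TAG': 'T_OPEN_TAG',
--         'T_ARRAY': 'T_ARRAY',
--         'T_WHITESPACE': 'T_WHITESPACE',
--         'BRACE_OPEN': '(',
--         'BRACE_CLOSE': ')',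
--     }
--
--     @classmethod
--     def equals(cls, code, value):
--         return cls.TOKEN_MAP[code] == value
-- ===== SOURCE B (Python) =====
-- def gen_converted_code(tokens):
--     n = len(tokens)
--     # Pass 1 (right-to-left): nws[i] = index of first non-whitespace token at or after i (n if none).
--     nws = [n] * (n + 1)
--     for i in range(n - 1, -1, -1):
--         nws[i] = nws[i + 1] if tokens[i][0] == 'T_WHITESPACE' else i
--     # Pass 2 (left-to-right): match parentheses with a stack.
--     close_of = {}
--     stack = []
--     for i, t in enumerate(tokens):
--         if t[0] == '(':
--             stack.append(i)
--         elif t[0] == ')' and stack: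
--             close_of[stack.pop()] = i
--     # Pass 3: emit, jumping over each array's erased "array ( " span.
--     out = []
--     closers = set()
--     i = 0
--     while i < n:
--         t = tokens[i]
--         j = nws[i + 1]
--         if t[0] == 'T_ARRAY' and j < n and tokens[j][0] == '(' and j in close_of:
--             out.append('[')
--             closers.add(close_of[j])
--             i = j + 1
--         else:
--             out.append(']' if i in closers else t[1])
--             i += 1
--     return ''.join(out)
-- ===== Notes on version B (the rewrite author's own statement) =====
-- stated objective: alternative
-- what changed: A runs a fresh forward depth-counting scan over the token suffix for every T_ARRAY token (quadratic when arrays are dense); B instead matches all parentheses once with a single left-to-right stack pass plus a right-to-left next-non-whitespace pass, then emits the output in one sweep.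
-- outside the precondition, e.g. on gen_converted_code([['T_ARRAY'], ['('], [')']]): A returns '[]', B returns '[]'
import Mathlib
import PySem

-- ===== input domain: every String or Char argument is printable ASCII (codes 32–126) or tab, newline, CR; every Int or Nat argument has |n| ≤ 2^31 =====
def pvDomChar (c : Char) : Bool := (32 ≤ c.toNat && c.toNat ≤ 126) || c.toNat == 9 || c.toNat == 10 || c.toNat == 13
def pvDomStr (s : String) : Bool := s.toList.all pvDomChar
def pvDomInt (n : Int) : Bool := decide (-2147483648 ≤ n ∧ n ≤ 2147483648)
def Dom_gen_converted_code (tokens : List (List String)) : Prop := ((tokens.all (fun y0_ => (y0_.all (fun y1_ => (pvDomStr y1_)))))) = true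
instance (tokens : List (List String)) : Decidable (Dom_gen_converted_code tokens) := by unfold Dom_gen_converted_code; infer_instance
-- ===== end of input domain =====

-- B replaces A's per-T_ARRAY forward rescans (one depth-counting scan per array token) by one
-- global stack pass matching all parentheses, plus a single emitting sweep: an alternative
-- single-pass algorithm for the same exact output.

-- ===== PORT A =====
-- t[0] on a token: exact for nonempty tokens (guaranteed by Pre_; getD stands for the raising access)
def pvTok0 (t : List String) : String := t.getD 0 ""

-- the 'find the matching open brace' loop over tokens[i_next:] (continue on whitespace, break otherwise)
def pvFindOpenA : List (List String) → Nat → Option Nat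
  | [], _ => none
  | t2 :: rest, idx =>
    if pvTok0 t2 = "T_WHITESPACE" then pvFindOpenA rest (idx + 1)
    else if pvTok0 t2 = "(" then some idx
    else none

-- the 'find the matching close brace' depth-counting loop over tokens[i_next:]
def pvFindCloseA : List (List String) → Nat → Int → Option Nat
  | [], _, _ => none
  | t2 :: rest, idx, depth =>
    if pvTok0 t2 = "(" then pvFindCloseA rest (idx + 1) (depth + 1)
    else if pvTok0 t2 = ")" then
      (if depth - 1 = 0 then some idx else pvFindCloseA rest (idx + 1) (depth - 1))
    else pvFindCloseA rest (idx + 1) depth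

-- the literal replacement values ['[', '[', None] etc.
def pvArrayRepl : List (Option String) := [some "[", some "[", none]
def pvEmptyRepl : List (Option String) := [some "", some "", none]
def pvCloseRepl : List (Option String) := [some "]", some "]", none]

-- the 'for i, t1 in enumerate(tokens)' registration loop; l is the remaining suffix tokens[i:]
def pvBuildRepl : List (List String) → Nat → PySem.Dict Nat (List (Option String)) →
    PySem.Dict Nat (List (Option String))
  | [], _, repl => repl
  | t1 :: rest, i, repl =>
    pvBuildRepl rest (i + 1)
      (if pvTok0 t1 = "T_ARRAY" then
        match pvFindOpenA rest (i + 1), pvFindCloseA rest (i + 1) 0 with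
        | some iopen, some iclose =>
          (((List.range' (i + 1) (iopen - i)).foldl (fun r k => r.insert k pvEmptyRepl)
              ((repl.insert i pvArrayRepl)))).insert iclose pvCloseRepl
        | _, _ => repl
      else repl)

-- the final 'for i, t in enumerate(tokens)' loop (try replacements[i] / except: keep t);
-- original tokens are embedded with 'some' so the converted list is uniformly typed
def pvConvert : List (List String) → Nat → PySem.Dict Nat (List (Option String)) →
    List (List (Option String))
  | [], _, _ => []
  | t :: rest, i, repl =>
    (match repl.get? i with
     | some token => token
     | none => t.map some) :: pvConvert rest (i + 1) repl

def gen_converted_code (tokens : List (List String)) : String :=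
  let repl := pvBuildRepl tokens 0 PySem.Dict.empty
  let conv := pvConvert tokens 0 repl
  -- ''.join(x[1] for x in tokens_converted): x[1] exists and is a str under Pre_
  PySem.Str.join "" (conv.map (fun x => (x.getD 1 (some "")).getD ""))

-- ===== PORT B =====
-- Pass 1: nws[i] = first non-whitespace index at or after i (n if none); right-to-left fill
def pvNwsList : List (List String) → Nat → List Nat
  | [], i => [i]
  | t :: rest, i =>
    let tail := pvNwsList rest (i + 1)
    (if pvTok0 t = "T_WHITESPACE" then tail.headD 0 else i) :: tail

-- Pass 2: match parentheses with a stack (close_of[open index] = close index)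
def pvMatchPass : List (List String) → Nat → List Nat → PySem.Dict Nat Nat → PySem.Dict Nat Nat
  | [], _, _, m => m
  | t :: rest, i, stack, m =>
    if pvTok0 t = "(" then pvMatchPass rest (i + 1) (i :: stack) m
    else if pvTok0 t = ")" then
      match stack with
      | [] => pvMatchPass rest (i + 1) [] m
      | s :: ss => pvMatchPass rest (i + 1) ss (m.insert s i)
    else pvMatchPass rest (i + 1) stack m

-- Pass 3: the while loop; fuel only makes the jumping index loop structurally total
def pvEmitPass (tokens : List (List String)) (nws : List Nat) (closeOf : PySem.Dict Nat Nat) :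
    Nat → Nat → PySem.Set Nat → List String → List String
  | 0, _, _, out => out
  | fuel + 1, i, closers, out =>
    if i < tokens.length then
      let t := tokens.getD i []
      let j := nws.getD (i + 1) 0
      if pvTok0 t = "T_ARRAY" ∧ j < tokens.length ∧ pvTok0 (tokens.getD j []) = "(" ∧
          closeOf.contains j = true then
        pvEmitPass tokens nws closeOf fuel (j + 1)
          (PySem.Set.add closers ((closeOf.get? j).getD 0)) (out ++ ["["])
      else
        pvEmitPass tokens nws closeOf fuel (i + 1) closers
          (out ++ [if closers.contains i then "]" else t.getD 1 ""])
    else out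

def gen_converted_code_alt (tokens : List (List String)) : String :=
  let n := tokens.length
  let nws := pvNwsList tokens 0
  let closeOf := pvMatchPass tokens 0 [] PySem.Dict.empty
  PySem.Str.join "" (pvEmitPass tokens nws closeOf (n + 1) 0 PySem.Set.empty [])

-- ===== PRECONDITION & SPEC =====
-- Pre_ excludes token lists containing a token with fewer than 2 items: on those Python A raises
-- IndexError (t[0] or the final x[1]) — except that a short token which happens to be fully erased
-- by a replacement escapes the error; that accidental escape is also excluded (see claim cites).
def Pre_gen_converted_code (tokens : List (List String)) : Prop := ∀ t ∈ tokens, 2 ≤ t.length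
instance (tokens : List (List String)) : Decidable (Pre_gen_converted_code tokens) := by
  unfold Pre_gen_converted_code; infer_instance

def pvWitness_gen_converted_code : List (List String) :=
  [["T_ARRAY", "array"], ["T_WHITESPACE", " "], ["(", "("], ["x", "1"], [")", ")"]]

def Spec_gen_converted_code (tokens : List (List String)) (out : String) : Prop :=
  out = gen_converted_code_alt tokens
instance (tokens : List (List String)) (out : String) : Decidable (Spec_gen_converted_code tokens out) := by
  unfold Spec_gen_converted_code; infer_instance

-- ===== CLAIM (what is proved, stated in full; the proofs are below) =====
def Claim_equal_gen_converted_code : Prop := ∀ (tokens : List (List String)),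
  Dom_gen_converted_code tokens → Pre_gen_converted_code tokens →
  Spec_gen_converted_code tokens (gen_converted_code tokens)

-- ===== LEMMAS AND PROOFS =====

-- ---- shared spec layer: per-index characterisation of the conversion ----
def pvKind (tokens : List (List String)) (q : Nat) : String := pvTok0 (tokens.getD q [])
def pvVal (tokens : List (List String)) (q : Nat) : String := (tokens.getD q []).getD 1 ""

-- first non-whitespace position at or after i, where l = tokens.drop i
def pvNwsF : List (List String) → Nat → Nat
  | [], i => i
  | t :: rest, i => if pvTok0 t = "T_WHITESPACE" then pvNwsF rest (i + 1) else i

def pvOpen (tokens : List (List String)) (i : Nat) : Nat := pvNwsF (tokens.drop (i + 1)) (i + 1)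
def pvScanO (tokens : List (List String)) (j : Nat) : Option Nat := pvFindCloseA (tokens.drop j) j 0

def pvHead (tokens : List (List String)) (h : Nat) : Prop :=
  h < tokens.length ∧ pvKind tokens h = "T_ARRAY" ∧ pvOpen tokens h < tokens.length ∧
  pvKind tokens (pvOpen tokens h) = "(" ∧ (pvScanO tokens (pvOpen tokens h)).isSome = true
def pvCloser (tokens : List (List String)) (h : Nat) : Nat := (pvScanO tokens (pvOpen tokens h)).getD 0
def pvInReg (tokens : List (List String)) (h q : Nat) : Prop :=
  q = h ∨ (h < q ∧ q ≤ pvOpen tokens h) ∨ q = pvCloser tokens h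
def pvRegion (tokens : List (List String)) (q : Nat) : Prop :=
  ∃ h, pvHead tokens h ∧ pvInReg tokens h q

def pvHeadB (tokens : List (List String)) (h : Nat) : Bool :=
  decide (h < tokens.length) && (pvKind tokens h == "T_ARRAY") &&
  decide (pvOpen tokens h < tokens.length) && (pvKind tokens (pvOpen tokens h) == "(") &&
  (pvScanO tokens (pvOpen tokens h)).isSome
def pvRegionB (tokens : List (List String)) (q : Nat) : Bool :=
  (List.range tokens.length).any (fun h => pvHeadB tokens h &&
    (decide (q = h) || (decide (h < q) && decide (q ≤ pvOpen tokens h)) || decide (q = pvCloser tokens h)))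

def pvSpecEmit (tokens : List (List String)) (q : Nat) : String :=
  if pvRegionB tokens q then
    (if pvKind tokens q = "T_ARRAY" then "[" else if pvKind tokens q = ")" then "]" else "")
  else pvVal tokens q

lemma pvHeadB_iff (tokens : List (List String)) (h : Nat) :
    pvHeadB tokens h = true ↔ pvHead tokens h := by
  simp only [pvHeadB, pvHead, Bool.and_eq_true, decide_eq_true_eq, beq_iff_eq]
  tauto

lemma pvRegionB_iff (tokens : List (List String)) (q : Nat) :
    pvRegionB tokens q = true ↔ pvRegion tokens q := by
  simp only [pvRegionB, List.any_eq_true, List.mem_range, Bool.and_eq_true, Bool.or_eq_true,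
    decide_eq_true_eq, pvHeadB_iff, pvRegion, pvInReg]
  constructor
  · rintro ⟨h, _, hh, hr⟩; exact ⟨h, hh, by tauto⟩
  · rintro ⟨h, hh, hr⟩; exact ⟨h, hh.1, hh, by tauto⟩

-- ---- generic positional facts ----
lemma pv_drop_cons {tokens : List (List String)} {i : Nat} {t : List String} {rest : List (List String)}
    (h : tokens.drop i = t :: rest) :
    tokens.getD i [] = t ∧ tokens.drop (i + 1) = rest ∧ i < tokens.length := by
  have hlen : i < tokens.length := by
    by_contra hc
    rw [List.drop_eq_nil_of_le (by omega)] at h; exact (List.cons_ne_nil _ _ h.symm)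
  have h0 : tokens[i]? = some t := by
    have := List.getElem?_drop (xs := tokens) (i := i) (j := 0)
    rw [h] at this; simpa using this.symm
  refine ⟨?_, ?_, hlen⟩
  · rw [List.getD_eq_getElem?_getD, h0]; rfl
  · have := List.tail_drop (l := tokens) (i := i)
    rw [h] at this; simpa using this.symm

lemma pv_drop_nil {tokens : List (List String)} {i : Nat} (h : tokens.drop i = ([] : List (List String))) :
    tokens.length ≤ i := by
  by_contra hc
  have := List.length_drop (l := tokens) (i := i)
  rw [h] at this; simp at this; omega

lemma pv_drop_cons_self {tokens : List (List String)} {i : Nat} (h : i < tokens.length) :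
    tokens.drop i = tokens.getD i [] :: tokens.drop (i + 1) := by
  rw [List.drop_eq_getElem_cons h]
  simp [List.getD_eq_getElem?_getD, List.getElem?_eq_getElem h]

-- ---- nwsF facts ----
lemma pvNwsF_ge : ∀ (l : List (List String)) (i : Nat), i ≤ pvNwsF l i := by
  intro l
  induction l with
  | nil => intro i; simp [pvNwsF]
  | cons t rest ih =>
    intro i
    simp only [pvNwsF]
    split
    · exact le_trans (by omega) (ih (i + 1))
    · exact le_refl i

lemma pvNwsF_ws (tokens : List (List String)) : ∀ (l : List (List String)) (i : Nat),
    l = tokens.drop i → ∀ p, i ≤ p → p < pvNwsF l i → pvKind tokens p = "T_WHITESPACE" := by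
  intro l
  induction l with
  | nil => intro i _ p h1 h2; simp [pvNwsF] at h2; omega
  | cons t rest ih =>
    intro i hl p h1 h2
    obtain ⟨hg, hd, _⟩ := pv_drop_cons hl.symm
    simp only [pvNwsF] at h2
    by_cases hws : pvTok0 t = "T_WHITESPACE"
    · rw [if_pos hws] at h2
      rcases Nat.eq_or_lt_of_le h1 with h | h
      · rw [pvKind, ← h, hg]; exact hws
      · exact ih (i + 1) hd.symm p h h2
    · rw [if_neg hws] at h2; omega

lemma pvFindOpenA_iff (tokens : List (List String)) : ∀ (l : List (List String)) (i j : Nat),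
    l = tokens.drop i →
    (pvFindOpenA l i = some j ↔
      pvNwsF l i = j ∧ j < tokens.length ∧ pvKind tokens j = "(") := by
  intro l
  induction l with
  | nil =>
    intro i j hl
    have := pv_drop_nil hl.symm
    simp only [pvFindOpenA, pvNwsF]
    constructor
    · intro h; cases h
    · rintro ⟨rfl, h2, _⟩; omega
  | cons t rest ih =>
    intro i j hl
    obtain ⟨hg, hd, hlen⟩ := pv_drop_cons hl.symm
    have hk : pvKind tokens i = pvTok0 t := by rw [pvKind, hg]
    simp only [pvFindOpenA, pvNwsF]
    by_cases hws : pvTok0 t = "T_WHITESPACE"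
    · rw [if_pos hws, if_pos hws]; exact ih (i + 1) j hd.symm
    · rw [if_neg hws, if_neg hws]
      by_cases hop : pvTok0 t = "("
      · rw [if_pos hop]
        constructor
        · rintro h; cases h; exact ⟨rfl, hlen, by rw [hk]; exact hop⟩
        · rintro ⟨rfl, _, _⟩; rfl
      · rw [if_neg hop]
        constructor
        · intro h; cases h
        · rintro ⟨rfl, _, hkj⟩; rw [hk] at hkj; exact absurd hkj hop

-- ---- close-scan facts ----
lemma pvFindCloseA_spec (tokens : List (List String)) : ∀ (l : List (List String)) (i : Nat) (d : Int) (c : Nat),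
    l = tokens.drop i → pvFindCloseA l i d = some c →
    i ≤ c ∧ c < tokens.length ∧ pvKind tokens c = ")" := by
  intro l
  induction l with
  | nil => intro i d c _ h; cases h
  | cons t rest ih =>
    intro i d c hl h
    obtain ⟨hg, hd, hlen⟩ := pv_drop_cons hl.symm
    have hk : pvKind tokens i = pvTok0 t := by rw [pvKind, hg]
    simp only [pvFindCloseA] at h
    by_cases hop : pvTok0 t = "("
    · rw [if_pos hop] at h
      obtain ⟨h1, h2, h3⟩ := ih (i + 1) _ c hd.symm h
      exact ⟨by omega, h2, h3⟩
    · rw [if_neg hop] at h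
      by_cases hcl : pvTok0 t = ")"
      · rw [if_pos hcl] at h
        by_cases hz : d - 1 = 0
        · rw [if_pos hz] at h; cases h
          exact ⟨le_refl _, hlen, by rw [hk]; exact hcl⟩
        · rw [if_neg hz] at h
          obtain ⟨h1, h2, h3⟩ := ih (i + 1) _ c hd.symm h
          exact ⟨by omega, h2, h3⟩
      · rw [if_neg hcl] at h
        obtain ⟨h1, h2, h3⟩ := ih (i + 1) _ c hd.symm h
        exact ⟨by omega, h2, h3⟩

lemma pvFindCloseA_skip_ws (tokens : List (List String)) : ∀ (k i : Nat) (d : Int),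
    (∀ p, i ≤ p → p < i + k → pvKind tokens p = "T_WHITESPACE") → i + k ≤ tokens.length →
    pvFindCloseA (tokens.drop i) i d = pvFindCloseA (tokens.drop (i + k)) (i + k) d := by
  intro k
  induction k with
  | zero => intro i d _ _; rfl
  | succ k ih =>
    intro i d hws hle
    have hlen : i < tokens.length := by omega
    have hkind : pvKind tokens i = "T_WHITESPACE" := hws i (le_refl _) (by omega)
    have hstep : pvFindCloseA (tokens.drop i) i d = pvFindCloseA (tokens.drop (i + 1)) (i + 1) d := by
      rw [pv_drop_cons_self hlen]
      simp only [pvFindCloseA]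
      rw [if_neg (by rw [← pvKind, hkind]; decide), if_neg (by rw [← pvKind, hkind]; decide)]
    rw [hstep]
    have harr : i + (k + 1) = (i + 1) + k := by omega
    rw [harr]
    exact ih (i + 1) d (fun p h1 h2 => hws p (by omega) (by omega)) (by omega)

lemma pvCloser_gt (tokens : List (List String)) {h : Nat} (hh : pvHead tokens h) :
    pvOpen tokens h < pvCloser tokens h ∧ pvCloser tokens h < tokens.length ∧
    pvKind tokens (pvCloser tokens h) = ")" := by
  obtain ⟨_, _, hjlen, hjk, hsome⟩ := hh
  set j := pvOpen tokens h with hj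
  obtain ⟨c, hc⟩ := Option.isSome_iff_exists.mp hsome
  have hcl : pvCloser tokens h = c := by rw [pvCloser, ← hj, hc]; rfl
  rw [hcl]
  have hstep : pvFindCloseA (tokens.drop j) j 0 = pvFindCloseA (tokens.drop (j + 1)) (j + 1) 1 := by
    rw [pv_drop_cons_self hjlen]
    simp only [pvFindCloseA]
    rw [if_pos (by rw [← pvKind]; exact hjk)]
    norm_num
  rw [pvScanO, hstep] at hc
  obtain ⟨h1, h2, h3⟩ := pvFindCloseA_spec tokens _ (j + 1) 1 c rfl hc
  exact ⟨by omega, h2, h3⟩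

-- ---- the stack pass computes exactly A's depth-scan partner ----
lemma pvMatchPass_spec (tokens : List (List String)) : ∀ (l : List (List String)) (i : Nat)
    (stack : List Nat) (m0 : PySem.Dict Nat Nat),
    l = tokens.drop i →
    (∀ p (hp : p < stack.length), pvScanO tokens stack[p] = pvFindCloseA l i ((p : Int) + 1)) →
    (∀ s ∈ stack, s < i) → stack.Nodup →
    (∀ s ∈ stack, m0.get? s = none) →
    (∀ k c, m0.get? k = some c → k < i) →
    ∀ j, pvKind tokens j = "(" → j < tokens.length →
      ((j ∈ stack ∨ i ≤ j → (pvMatchPass l i stack m0).get? j = pvScanO tokens j) ∧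
       (¬(j ∈ stack ∨ i ≤ j) → (pvMatchPass l i stack m0).get? j = m0.get? j)) := by
  intro l
  induction l with
  | nil =>
    intro i stack m0 hl h2 h3 _ h5 _ j hkj hjn
    have hn := pv_drop_nil hl.symm
    simp only [pvMatchPass]
    constructor
    · rintro (hmem | hle)
      · obtain ⟨p, hp, rfl⟩ := List.mem_iff_getElem.mp hmem
        rw [h5 _ hmem, h2 p hp]
        rfl
      · omega
    · intro _; trivial
  | cons t rest ih =>
    intro i stack m0 hl h2 h3 h4 h5 h6 j hkj hjn
    obtain ⟨hg, hd, hlen⟩ := pv_drop_cons hl.symm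
    have hki : pvKind tokens i = pvTok0 t := by rw [pvKind, hg]
    simp only [pvMatchPass]
    by_cases hop : pvTok0 t = "("
    · rw [if_pos hop]
      have key := ih (i + 1) (i :: stack) m0 hd.symm
        (by
          intro p hp
          match p with
          | 0 =>
            simp only [List.getElem_cons_zero]
            have : pvScanO tokens i = pvFindCloseA (t :: rest) i 0 := by
              rw [pvScanO, hl]
            rw [this]
            simp only [pvFindCloseA, if_pos hop]
            norm_num
          | p + 1 =>
            simp only [List.getElem_cons_succ]
            rw [h2 p (by simpa using hp)]
            simp only [pvFindCloseA, if_pos hop]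
            push_cast
            try rfl)
        (by intro s hs; rcases List.mem_cons.mp hs with rfl | hs; omega; exact lt_trans (h3 s hs) (by omega))
        (by exact List.nodup_cons.mpr ⟨fun hmem => absurd (h3 i hmem) (by omega), h4⟩)
        (by
          intro s hs
          rcases List.mem_cons.mp hs with rfl | hs
          · cases hc : m0.get? s with
            | none => rfl
            | some c => exact absurd (h6 _ _ hc) (by omega)
          · exact h5 s hs)
        (by intro k c hc; exact lt_trans (h6 k c hc) (by omega))
        j hkj hjn
      constructor
      · rintro (hmem | hle)
        · exact key.1 (Or.inl (List.mem_cons_of_mem _ hmem))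
        · rcases Nat.eq_or_lt_of_le hle with rfl | h
          · exact key.1 (Or.inl (List.mem_cons_self))
          · exact key.1 (Or.inr h)
      · intro hno
        push_neg at hno
        exact key.2 (by push_neg; exact ⟨fun hm => by
          rcases List.mem_cons.mp hm with rfl | hm
          · omega
          · exact hno.1 hm, by omega⟩)
    · rw [if_neg hop]
      by_cases hcl : pvTok0 t = ")"
      · rw [if_pos hcl]
        have hji : j ≠ i := fun he => by rw [he, hki, hcl] at hkj; exact absurd hkj (by decide)
        match stack with
        | [] =>
          have key := ih (i + 1) [] m0 hd.symm
            (by intro p hp; simp at hp)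
            (by intro s hs; simp at hs)
            (List.nodup_nil)
            (by intro s hs; simp at hs)
            (by intro k c hc; exact lt_trans (h6 k c hc) (by omega))
            j hkj hjn
          constructor
          · rintro (hmem | hle)
            · simp at hmem
            · exact key.1 (Or.inr (by omega))
          · intro hno
            push_neg at hno
            exact key.2 (by push_neg; exact ⟨fun hm => by simp at hm, by omega⟩)
        | s :: ss =>
          have hsi : s < i := h3 s (List.mem_cons_self)
          have hscan_s : pvScanO tokens s = some i := by
            have := h2 0 (by simp)
            simp only [List.getElem_cons_zero] at this
            rw [this]
            simp only [pvFindCloseA, if_neg hop, if_pos hcl]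
            norm_num
          have key := ih (i + 1) ss (m0.insert s i) hd.symm
            (by
              intro p hp
              have := h2 (p + 1) (by simpa using Nat.succ_lt_succ hp)
              simp only [List.getElem_cons_succ] at this
              rw [this]
              simp only [pvFindCloseA, if_neg hop, if_pos hcl]
              rw [if_neg (by push_cast; omega)]
              have harg : (((p + 1 : Nat) : Int) + 1 - 1) = (p : Int) + 1 := by push_cast; ring
              rw [harg])
            (by intro x hx; exact lt_trans (h3 x (List.mem_cons_of_mem _ hx)) (by omega))
            ((List.nodup_cons.mp h4).2)
            (by
              intro x hx
              have hxs : x ≠ s := fun he => (List.nodup_cons.mp h4).1 (he ▸ hx)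
              rw [PySem.Dict.get?_insert, if_neg hxs]
              exact h5 x (List.mem_cons_of_mem _ hx))
            (by
              intro k c hc
              rw [PySem.Dict.get?_insert] at hc
              by_cases hks : k = s
              · omega
              · rw [if_neg hks] at hc; exact lt_trans (h6 k c hc) (by omega))
            j hkj hjn
          constructor
          · rintro (hmem | hle)
            · rcases List.mem_cons.mp hmem with rfl | hmem
              · have hjss : j ∉ ss := (List.nodup_cons.mp h4).1
                rw [key.2 (by push_neg; exact ⟨hjss, by omega⟩)]
                rw [PySem.Dict.get?_insert, if_pos rfl, hscan_s]
              · exact key.1 (Or.inl hmem)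
            · exact key.1 (Or.inr (by omega))
          · intro hno
            push_neg at hno
            have hjs : j ≠ s := fun he => hno.1 (he ▸ List.mem_cons_self)
            have hjss : j ∉ ss := fun hm => hno.1 (List.mem_cons_of_mem _ hm)
            rw [key.2 (by push_neg; exact ⟨hjss, by omega⟩)]
            rw [PySem.Dict.get?_insert, if_neg hjs]
      · rw [if_neg hcl]
        have hji : j ≠ i := fun he => by rw [he, hki] at hkj; exact hop hkj
        have key := ih (i + 1) stack m0 hd.symm
          (by
            intro p hp
            rw [h2 p hp]
            simp only [pvFindCloseA, if_neg hop, if_neg hcl])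
          (by intro s hs; exact lt_trans (h3 s hs) (by omega))
          h4
          h5
          (by intro k c hc; exact lt_trans (h6 k c hc) (by omega))
          j hkj hjn
        constructor
        · rintro (hmem | hle)
          · exact key.1 (Or.inl hmem)
          · exact key.1 (Or.inr (by omega))
        · intro hno
          push_neg at hno
          exact key.2 (by push_neg; exact ⟨hno.1, by omega⟩)

lemma pvCloseOf_eq (tokens : List (List String)) {j : Nat} (hk : pvKind tokens j = "(")
    (hj : j < tokens.length) :
    (pvMatchPass tokens 0 [] PySem.Dict.empty).get? j = pvScanO tokens j := by
  have key := pvMatchPass_spec tokens tokens 0 [] PySem.Dict.empty (by simp)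
    (by intro p hp; simp at hp)
    (by intro s hs; simp at hs)
    List.nodup_nil
    (by intro s hs; simp at hs)
    (by intro k c hc; rw [PySem.Dict.get?_empty] at hc; cases hc)
    j hk hj
  exact key.1 (Or.inr (Nat.zero_le j))

-- ---- A side: the replacements dict per key ----
def pvReplVal (tokens : List (List String)) (q : Nat) : List (Option String) :=
  if pvKind tokens q = "T_ARRAY" then pvArrayRepl
  else if pvKind tokens q = ")" then pvCloseRepl else pvEmptyRepl

lemma pvFoldInsertRange_get? (ks : List Nat) :
    ∀ (repl : PySem.Dict Nat (List (Option String))) (q : Nat),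
    ((ks.foldl (fun r k => r.insert k pvEmptyRepl) repl)).get? q =
      if q ∈ ks then some pvEmptyRepl else repl.get? q := by
  induction ks with
  | nil => intro repl q; simp
  | cons k ks ih =>
    intro repl q
    simp only [List.foldl_cons, List.mem_cons]
    rw [ih]
    by_cases hks : q ∈ ks
    · rw [if_pos hks, if_pos (Or.inr hks)]
    · rw [if_neg hks, PySem.Dict.get?_insert]
      by_cases hqk : q = k
      · rw [if_pos hqk, if_pos (Or.inl hqk)]
      · rw [if_neg hqk, if_neg (by tauto)]

lemma pvBuildRepl_get? (tokens : List (List String)) : ∀ (l : List (List String)) (i : Nat)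
    (repl : PySem.Dict Nat (List (Option String))),
    l = tokens.drop i →
    ∀ q, (((∃ h, i ≤ h ∧ pvHead tokens h ∧ pvInReg tokens h q) →
            (pvBuildRepl l i repl).get? q = some (pvReplVal tokens q)) ∧
           (¬(∃ h, i ≤ h ∧ pvHead tokens h ∧ pvInReg tokens h q) →
            (pvBuildRepl l i repl).get? q = repl.get? q)) := by
  intro l
  induction l with
  | nil =>
    intro i repl hl q
    have hn := pv_drop_nil hl.symm
    simp only [pvBuildRepl]
    constructor
    · rintro ⟨h, hle, hh, _⟩
      exact absurd hh.1 (by omega)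
    · intro _; trivial
  | cons t rest ih =>
    intro i repl hl q
    obtain ⟨hg, hd, hlen⟩ := pv_drop_cons hl.symm
    have hki : pvKind tokens i = pvTok0 t := by rw [pvKind, hg]
    have hsplit : ∀ (repl' : PySem.Dict Nat (List (Option String))),
        (((pvHead tokens i ∧ pvInReg tokens i q) →
            repl'.get? q = some (pvReplVal tokens q)) ∧
         (¬(pvHead tokens i ∧ pvInReg tokens i q) → repl'.get? q = repl.get? q)) →
        (((∃ h, i ≤ h ∧ pvHead tokens h ∧ pvInReg tokens h q) →
            (pvBuildRepl rest (i + 1) repl').get? q = some (pvReplVal tokens q)) ∧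
         (¬(∃ h, i ≤ h ∧ pvHead tokens h ∧ pvInReg tokens h q) →
            (pvBuildRepl rest (i + 1) repl').get? q = repl.get? q)) := by
      intro repl' hstep
      have key := ih (i + 1) repl' hd.symm q
      constructor
      · rintro ⟨h, hle, hh, hr⟩
        rcases Nat.eq_or_lt_of_le hle with rfl | hgt
        · by_cases hex : ∃ h', i + 1 ≤ h' ∧ pvHead tokens h' ∧ pvInReg tokens h' q
          · exact key.1 hex
          · rw [key.2 hex, hstep.1 ⟨hh, hr⟩]
        · exact key.1 ⟨h, by omega, hh, hr⟩
      · intro hno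
        have hni : ¬(pvHead tokens i ∧ pvInReg tokens i q) :=
          fun ⟨hh, hr⟩ => hno ⟨i, le_refl _, hh, hr⟩
        have hno' : ¬∃ h, i + 1 ≤ h ∧ pvHead tokens h ∧ pvInReg tokens h q :=
          fun ⟨h, hle, hh, hr⟩ => hno ⟨h, by omega, hh, hr⟩
        rw [key.2 hno', hstep.2 hni]
    simp only [pvBuildRepl]
    by_cases harr : pvTok0 t = "T_ARRAY"
    · rw [if_pos harr]
      cases hfo : pvFindOpenA rest (i + 1) with
      | none =>
        apply hsplit
        refine ⟨fun ⟨hh, _⟩ => ?_, fun _ => rfl⟩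
        have : pvFindOpenA rest (i + 1) = some (pvOpen tokens i) :=
          (pvFindOpenA_iff tokens rest (i + 1) (pvOpen tokens i) hd.symm).mpr
            ⟨by rw [pvOpen, hd], hh.2.2.1, hh.2.2.2.1⟩
        rw [hfo] at this; cases this
      | some iopen =>
        obtain ⟨hnws, hioplen, hiopk⟩ :=
          (pvFindOpenA_iff tokens rest (i + 1) iopen hd.symm).mp hfo
        have hio : pvOpen tokens i = iopen := by rw [pvOpen, hd]; exact hnws
        have hge : i + 1 ≤ iopen := by
          rw [← hio, pvOpen, hd]; exact pvNwsF_ge rest (i + 1)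
        have hskip : pvFindCloseA rest (i + 1) 0 = pvScanO tokens iopen := by
          have := pvFindCloseA_skip_ws tokens (iopen - (i + 1)) (i + 1) 0
            (by
              intro p h1 h2
              apply pvNwsF_ws tokens rest (i + 1) hd.symm p h1
              rw [hnws]; omega)
            (by omega)
          rw [hd] at this
          have harr2 : (i + 1) + (iopen - (i + 1)) = iopen := by omega
          rw [harr2] at this
          rw [this, pvScanO]
        cases hfc : pvFindCloseA rest (i + 1) 0 with
        | none =>
          apply hsplit
          refine ⟨fun ⟨hh, _⟩ => ?_, fun _ => rfl⟩
          have := hh.2.2.2.2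
          rw [hio, ← hskip, hfc] at this; cases this
        | some iclose =>
          have hscan : pvScanO tokens iopen = some iclose := by rw [← hskip, hfc]
          have hhead : pvHead tokens i := by
            refine ⟨hlen, by rw [hki]; exact harr, ?_, ?_, ?_⟩
            · rw [hio]; exact hioplen
            · rw [hio]; exact hiopk
            · rw [hio, hscan]; rfl
          have hcl : pvCloser tokens i = iclose := by rw [pvCloser, hio, hscan]; rfl
          obtain ⟨hclge, hcllen, hclk⟩ := pvFindCloseA_spec tokens rest (i + 1) 0 iclose hd.symm hfc
          have hoplt : iopen < iclose := by
            have := (pvCloser_gt tokens hhead).1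
            rw [hio, hcl] at this
            exact this
          apply hsplit
          have hreg : ∀ x,
              ((((List.range' (i + 1) (iopen - i)).foldl (fun r k => r.insert k pvEmptyRepl)
                  ((repl.insert i pvArrayRepl)))).insert iclose pvCloseRepl).get? x =
                if x = iclose then some pvCloseRepl
                else if x ∈ List.range' (i + 1) (iopen - i) then some pvEmptyRepl
                else if x = i then some pvArrayRepl
                else repl.get? x := by
            intro x
            rw [PySem.Dict.get?_insert]
            by_cases h1 : x = iclose
            · rw [if_pos h1, if_pos h1]
            · rw [if_neg h1, if_neg h1, pvFoldInsertRange_get?]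
              by_cases h2 : x ∈ List.range' (i + 1) (iopen - i)
              · rw [if_pos h2, if_pos h2]
              · rw [if_neg h2, if_neg h2, PySem.Dict.get?_insert]
          have hmem : ∀ x, x ∈ List.range' (i + 1) (iopen - i) ↔ i + 1 ≤ x ∧ x ≤ iopen := by
            intro x
            rw [List.mem_range'_1]
            omega
          constructor
          · rintro ⟨_, hr⟩
            rw [hreg q]
            rcases hr with heq | ⟨hlt, hle⟩ | heq
            · -- q = i : the head itself
              rw [heq]
              rw [if_neg (by omega), if_neg (by rw [hmem]; omega), if_pos rfl, pvReplVal,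
                if_pos (by rw [hki]; exact harr)]
            · -- i < q ≤ iopen : erased
              rw [hio] at hle
              rw [if_neg (by omega), if_pos ((hmem q).mpr ⟨by omega, hle⟩), pvReplVal]
              rcases Nat.eq_or_lt_of_le hle with rfl | hqlt
              · rw [if_neg (by rw [hiopk]; decide), if_neg (by rw [hiopk]; decide)]
              · have hws : pvKind tokens q = "T_WHITESPACE" := by
                  apply pvNwsF_ws tokens rest (i + 1) hd.symm q (by omega)
                  rw [hnws]; omega
                rw [if_neg (by rw [hws]; decide), if_neg (by rw [hws]; decide)]
            · -- q = closer
              rw [hcl] at heq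
              rw [heq]
              rw [if_pos rfl, pvReplVal, if_neg (by rw [hclk]; decide), if_pos hclk]
          · intro hni
            have hnr : ¬ pvInReg tokens i q := fun hr => hni ⟨hhead, hr⟩
            rw [pvInReg, hio, hcl] at hnr
            push_neg at hnr
            obtain ⟨hn1, hn2, hn3⟩ := hnr
            rw [hreg q, if_neg hn3,
              if_neg (by rw [hmem]; rintro ⟨ha, hb⟩; exact absurd hb (by have := hn2 (by omega); omega)),
              if_neg hn1]
    · rw [if_neg harr]
      apply hsplit
      refine ⟨fun ⟨hh, _⟩ => ?_, fun _ => rfl⟩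
      obtain ⟨_, hk2, _⟩ := hh
      rw [hki] at hk2
      exact absurd hk2 harr

lemma pvConvert_emit (tokens : List (List String)) : ∀ (l : List (List String)) (i : Nat),
    l = tokens.drop i →
    (pvConvert l i (pvBuildRepl tokens 0 PySem.Dict.empty)).map
        (fun x => (x.getD 1 (some "")).getD "") =
      (List.range' i (tokens.length - i)).map (pvSpecEmit tokens) := by
  intro l
  induction l with
  | nil =>
    intro i hl
    have hn := pv_drop_nil hl.symm
    have h0 : tokens.length - i = 0 := by omega
    rw [h0]
    rfl
  | cons t rest ih =>
    intro i hl
    obtain ⟨hg, hd, hlen⟩ := pv_drop_cons hl.symm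
    have hsucc : tokens.length - i = (tokens.length - (i + 1)) + 1 := by omega
    rw [hsucc, List.range'_succ, List.map_cons]
    simp only [pvConvert, List.map_cons]
    rw [ih (i + 1) hd.symm]
    congr 1
    -- head element
    have hch := pvBuildRepl_get? tokens tokens 0 PySem.Dict.empty (by simp) i
    by_cases hr : pvRegion tokens i
    · obtain ⟨h, hh, hrg⟩ := hr
      rw [hch.1 ⟨h, Nat.zero_le h, hh, hrg⟩]
      rw [pvSpecEmit, if_pos ((pvRegionB_iff tokens i).mpr ⟨h, hh, hrg⟩), pvReplVal]
      by_cases hk1 : pvKind tokens i = "T_ARRAY"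
      · rw [if_pos hk1, if_pos hk1]; rfl
      · rw [if_neg hk1, if_neg hk1]
        by_cases hk2 : pvKind tokens i = ")"
        · rw [if_pos hk2, if_pos hk2]; rfl
        · rw [if_neg hk2, if_neg hk2]; rfl
    · have hnone : (pvBuildRepl tokens 0 PySem.Dict.empty).get? i = none := by
        rw [hch.2 (fun ⟨h, _, hh, hrg⟩ => hr ⟨h, hh, hrg⟩)]
        exact PySem.Dict.get?_empty i
      rw [hnone]
      rw [pvSpecEmit, if_neg (by rw [pvRegionB_iff]; exact hr), pvVal, hg]
      match t with
      | [] => rfl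
      | [a] => rfl
      | a :: b :: r => rfl

lemma pvJoin_nil : ∀ (l : List (List Char)), PySem.Chars.join [] l = l.flatten := by
  intro l
  induction l with
  | nil => rfl
  | cons x xs ih =>
    cases xs with
    | nil => simp [PySem.Chars.join, List.intercalate]
    | cons y ys =>
      simp only [PySem.Chars.join, List.intercalate] at *
      simp [List.intersperse] at *
      simp [ih]

lemma pvA_chars (tokens : List (List String)) :
    (gen_converted_code tokens).toList =
      (((List.range' 0 tokens.length).map (pvSpecEmit tokens)).map String.toList).flatten := by
  show (PySem.Str.join "" ((pvConvert tokens 0 (pvBuildRepl tokens 0 PySem.Dict.empty)).map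
      (fun x => (x.getD 1 (some "")).getD ""))).toList = _
  rw [PySem.Str.toList_join, pvConvert_emit tokens tokens 0 (by simp)]
  simp only [Nat.sub_zero]
  rw [show ("" : String).toList = ([] : List Char) from rfl, pvJoin_nil]

-- ---- B side ----
lemma pvNwsList_getD : ∀ (l : List (List String)) (i p : Nat), p ≤ l.length →
    (pvNwsList l i).getD p 0 = pvNwsF (l.drop p) (i + p) := by
  intro l
  induction l with
  | nil =>
    intro i p hp
    simp only [List.length_nil, Nat.le_zero] at hp
    subst hp
    simp [pvNwsList, pvNwsF]
  | cons t rest ih =>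
    intro i p hp
    match p with
    | 0 =>
      simp only [pvNwsList, List.getD_cons_zero, List.drop_zero, pvNwsF, Nat.add_zero]
      split
      · have h0 : (pvNwsList rest (i + 1)).headD 0 = (pvNwsList rest (i + 1)).getD 0 0 := by
          cases pvNwsList rest (i + 1) <;> rfl
        rw [h0, ih (i + 1) 0 (by omega)]
        rfl
      · rfl
    | p + 1 =>
      simp only [pvNwsList, List.getD_cons_succ, List.drop_succ_cons]
      rw [ih (i + 1) p (by simpa using hp)]
      congr 1
      omega

lemma pvEmitPass_spec (tokens : List (List String)) : ∀ (fuel i : Nat) (closers : PySem.Set Nat)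
    (out : List String),
    tokens.length - i < fuel → i ≤ tokens.length →
    (∀ c, c ∈ closers ↔ ∃ h, pvHead tokens h ∧ h < i ∧ pvCloser tokens h = c) →
    (∀ h, pvHead tokens h → h < i → pvOpen tokens h < i) →
    ((pvEmitPass tokens (pvNwsList tokens 0) (pvMatchPass tokens 0 [] PySem.Dict.empty)
        fuel i closers out).map String.toList).flatten =
      (out.map String.toList).flatten ++
        (((List.range' i (tokens.length - i)).map (pvSpecEmit tokens)).map String.toList).flatten := by
  intro fuel
  induction fuel with
  | zero => intro i closers out hfuel _ _ _; omega
  | succ fuel ih =>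
    intro i closers out hfuel hi hclo hopen
    by_cases hin : i < tokens.length
    · have hj : (pvNwsList tokens 0).getD (i + 1) 0 = pvOpen tokens i := by
        rw [pvNwsList_getD tokens 0 (i + 1) (by omega), pvOpen]
        congr 1
        omega
      simp only [pvEmitPass, if_pos hin]
      rw [hj]
      have hole : i + 1 ≤ pvOpen tokens i := pvNwsF_ge _ _
      by_cases hhead : pvHead tokens i
      · obtain ⟨hh1, hh2, hh3, hh4, hh5⟩ := hhead
        have hhead' : pvHead tokens i := ⟨hh1, hh2, hh3, hh4, hh5⟩
        have hget : (pvMatchPass tokens 0 [] PySem.Dict.empty).get? (pvOpen tokens i) =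
            pvScanO tokens (pvOpen tokens i) := pvCloseOf_eq tokens hh4 hh3
        rw [if_pos ⟨hh2, hh3, hh4, by
          rw [PySem.Dict.contains_eq_isSome_get?, hget]; exact hh5⟩]
        have hcv : ((pvMatchPass tokens 0 [] PySem.Dict.empty).get? (pvOpen tokens i)).getD 0 =
            pvCloser tokens i := by rw [hget]; rfl
        rw [hcv]
        obtain ⟨hocl, hcln, hclk⟩ := pvCloser_gt tokens hhead'
        have hmidws : ∀ q, i + 1 ≤ q → q < pvOpen tokens i → pvKind tokens q = "T_WHITESPACE" :=
          fun q h1 h2 => pvNwsF_ws tokens (tokens.drop (i + 1)) (i + 1) rfl q h1 h2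
        have hclo' : ∀ c, c ∈ PySem.Set.add closers (pvCloser tokens i) ↔
            ∃ h, pvHead tokens h ∧ h < pvOpen tokens i + 1 ∧ pvCloser tokens h = c := by
          intro c
          rw [PySem.Set.mem_add]
          constructor
          · rintro (hold | rfl)
            · obtain ⟨h, hh, hlt, hc⟩ := (hclo c).mp hold
              exact ⟨h, hh, by omega, hc⟩
            · exact ⟨i, hhead', by omega, rfl⟩
          · rintro ⟨h, hh, hlt, rfl⟩
            rcases Nat.lt_or_ge h i with hhi | hhi
            · exact Or.inl ((hclo _).mpr ⟨h, hh, hhi, rfl⟩)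
            · rcases Nat.eq_or_lt_of_le hhi with rfl | hgt
              · exact Or.inr rfl
              · exfalso
                obtain ⟨_, hk, _, _, _⟩ := hh
                rcases Nat.eq_or_lt_of_le (Nat.lt_succ_iff.mp hlt) with heq | hlt2
                · rw [heq, hh4] at hk; exact absurd hk (by decide)
                · rw [hmidws h (by omega) (by omega)] at hk
                  exact absurd hk (by decide)
        have hopen' : ∀ h, pvHead tokens h → h < pvOpen tokens i + 1 → pvOpen tokens h < pvOpen tokens i + 1 := by
          intro h hh hlt
          rcases Nat.lt_or_ge h i with hhi | hhi
          · have := hopen h hh hhi; omega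
          · rcases Nat.eq_or_lt_of_le hhi with rfl | hgt
            · omega
            · exfalso
              obtain ⟨_, hk, _, _, _⟩ := hh
              rcases Nat.eq_or_lt_of_le (Nat.lt_succ_iff.mp hlt) with heq | hlt2
              · rw [heq, hh4] at hk; exact absurd hk (by decide)
              · rw [hmidws h (by omega) (by omega)] at hk
                exact absurd hk (by decide)
        rw [ih (pvOpen tokens i + 1) _ _ (by omega) (by omega) hclo' hopen']
        have hemit : pvSpecEmit tokens i = "[" := by
          rw [pvSpecEmit, if_pos ((pvRegionB_iff tokens i).mpr ⟨i, hhead', Or.inl rfl⟩), if_pos hh2]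
        have hmidflat : (((List.range' (i + 1) (pvOpen tokens i - i)).map (pvSpecEmit tokens)).map
            String.toList).flatten = ([] : List Char) := by
          rw [List.flatten_eq_nil_iff]
          intro xs hxs
          simp only [List.map_map, List.mem_map] at hxs
          obtain ⟨q, hq, rfl⟩ := hxs
          rw [List.mem_range'_1] at hq
          have hreg : pvRegionB tokens q = true :=
            (pvRegionB_iff tokens q).mpr ⟨i, hhead', Or.inr (Or.inl ⟨by omega, by omega⟩)⟩
          simp only [Function.comp_apply, pvSpecEmit]
          rw [if_pos hreg]
          rcases Nat.eq_or_lt_of_le (show q ≤ pvOpen tokens i by omega) with heq | hlt2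
          · rw [if_neg (by rw [heq, hh4]; decide), if_neg (by rw [heq, hh4]; decide)]
            rfl
          · have hws := hmidws q (by omega) hlt2
            rw [if_neg (by rw [hws]; decide), if_neg (by rw [hws]; decide)]
            rfl
        have hr1 : tokens.length - i = ((pvOpen tokens i - i) + (tokens.length - (pvOpen tokens i + 1))) + 1 := by
          omega
        rw [hr1, List.range'_succ, ← List.range'_append_1,
          show (i + 1) + (pvOpen tokens i - i) = pvOpen tokens i + 1 from by omega]
        simp only [List.map_append, List.map_cons, List.flatten_append, List.flatten_cons, hemit,
          hmidflat, List.append_assoc, List.append_nil, List.nil_append, List.map_nil,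
          List.flatten_nil]
      · rw [if_neg (fun hgd => hhead ⟨hin, hgd.1, hgd.2.1, hgd.2.2.1, by
          have h4 := hgd.2.2.2
          rw [PySem.Dict.contains_eq_isSome_get?,
            pvCloseOf_eq tokens hgd.2.2.1 hgd.2.1] at h4
          exact h4⟩)]
        have hpiece : (if closers.contains i = true then "]" else (tokens.getD i []).getD 1 "") =
            pvSpecEmit tokens i := by
          by_cases hmem : i ∈ closers
          · rw [if_pos ((PySem.Set.contains_iff _ _).mpr hmem)]
            obtain ⟨h, hh, hlt, hceq⟩ := (hclo i).mp hmem
            have hkq : pvKind tokens i = ")" := by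
              rw [← hceq]; exact (pvCloser_gt tokens hh).2.2
            rw [pvSpecEmit,
              if_pos ((pvRegionB_iff tokens i).mpr ⟨h, hh, Or.inr (Or.inr hceq.symm)⟩),
              if_neg (by rw [hkq]; decide), if_pos hkq]
          · rw [if_neg (fun hc => hmem ((PySem.Set.contains_iff _ _).mp hc))]
            have hnreg : ¬ pvRegion tokens i := by
              rintro ⟨h, hh, (rfl | ⟨hlt, hle⟩ | hceq)⟩
              · exact hhead hh
              · exact absurd hle (by have := hopen h hh hlt; omega)
              · have hho : h + 1 ≤ pvOpen tokens h := pvNwsF_ge _ _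
                have := (pvCloser_gt tokens hh).1
                exact hmem ((hclo i).mpr ⟨h, hh, by omega, hceq.symm⟩)
            rw [pvSpecEmit, if_neg (by rw [pvRegionB_iff]; exact hnreg)]
            rfl
        rw [ih (i + 1) closers _ (by omega) (by omega)
          (by
            intro c
            rw [hclo c]
            constructor
            · rintro ⟨h, hh, hlt, hc⟩; exact ⟨h, hh, by omega, hc⟩
            · rintro ⟨h, hh, hlt, hc⟩
              rcases Nat.lt_succ_iff_lt_or_eq.mp hlt with hlt2 | rfl
              · exact ⟨h, hh, hlt2, hc⟩
              · exact absurd hh hhead)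
          (by
            intro h hh hlt
            rcases Nat.lt_succ_iff_lt_or_eq.mp hlt with hlt2 | rfl
            · have := hopen h hh hlt2; omega
            · exact absurd hh hhead)]
        have hr1 : tokens.length - i = (tokens.length - (i + 1)) + 1 := by omega
        rw [hr1, List.range'_succ]
        simp only [List.map_append, List.map_cons, List.flatten_append, List.flatten_cons,
          hpiece, List.append_assoc, List.map_nil, List.flatten_nil, List.nil_append]
    · have h0 : tokens.length - i = 0 := by omega
      simp only [pvEmitPass, if_neg hin]
      rw [h0]
      simp

lemma pvB_chars (tokens : List (List String)) :
    (gen_converted_code_alt tokens).toList =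
      (((List.range' 0 tokens.length).map (pvSpecEmit tokens)).map String.toList).flatten := by
  show (PySem.Str.join "" (pvEmitPass tokens (pvNwsList tokens 0)
      (pvMatchPass tokens 0 [] PySem.Dict.empty) (tokens.length + 1) 0 PySem.Set.empty [])).toList = _
  rw [PySem.Str.toList_join, show ("" : String).toList = ([] : List Char) from rfl, pvJoin_nil]
  rw [pvEmitPass_spec tokens (tokens.length + 1) 0 PySem.Set.empty [] (by omega) (by omega)
    (by
      intro c
      constructor
      · intro hc; cases hc
      · rintro ⟨h, _, hlt, _⟩; omega)
    (by intro h _ hlt; omega)]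
  simp

-- ===== VERDICT (by name: the statement is the Claim_ definition above) =====
theorem gen_converted_code_spec : Claim_equal_gen_converted_code := by
  intro tokens _ _
  unfold Spec_gen_converted_code
  exact String.toList_inj.mp ((pvA_chars tokens).trans (pvB_chars tokens).symm)
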